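-- pv_equiv track=rewrite | github.com/dar4datascience/Quacky-DENUE | quacky_denue/reader.py | _select_data_csv
-- ===== SOURCE A (Python) =====
-- def _select_data_csv(archive_names: list[str]) -> str:
--     csv_files = [x for x in archive_names if x.lower().endswith(".csv")]
--     if not csv_files:
--         raise ValueError("No DENUE csv file found in zip")
--
--     conjunto_candidates = [
--         x for x in csv_files if "conjunto" in x.lower() and "datos" in x.lower()
--     ]
--     if conjunto_candidates:
--         return sorted(conjunto_candidates)[0]
--
--     non_dictionary_candidates = [x for x in csv_files if "diccionario" not in x.lower()]
--     if non_dictionary_candidates: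
--         return sorted(non_dictionary_candidates)[0]
--
--     return sorted(csv_files)[0]
-- ===== SOURCE B (Python) =====
-- def _select_data_csv(archive_names: list[str]) -> str:
--     csv_files = [x for x in archive_names if x.lower().endswith(".csv")]
--     if not csv_files:
--         raise ValueError("No DENUE csv file found in zip")
--
--     def rank(x: str) -> int:
--         l = x.lower()
--         if "conjunto" in l and "datos" in l:
--             return 0
--         if "diccionario" not in l:
--             return 1
--         return 2
--
--     return min(csv_files, key=lambda x: (rank(x), x))
-- ===== Notes on version B (the rewrite author's own statement) =====
-- stated objective: simpler
-- what changed: Replaces A's three filtered passes with sort-and-take-head fallbacks by a single min over csv_files under the priority key (rank(x), x), where rank encodes conjunto+datos < non-diccionario < rest.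
import Mathlib
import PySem

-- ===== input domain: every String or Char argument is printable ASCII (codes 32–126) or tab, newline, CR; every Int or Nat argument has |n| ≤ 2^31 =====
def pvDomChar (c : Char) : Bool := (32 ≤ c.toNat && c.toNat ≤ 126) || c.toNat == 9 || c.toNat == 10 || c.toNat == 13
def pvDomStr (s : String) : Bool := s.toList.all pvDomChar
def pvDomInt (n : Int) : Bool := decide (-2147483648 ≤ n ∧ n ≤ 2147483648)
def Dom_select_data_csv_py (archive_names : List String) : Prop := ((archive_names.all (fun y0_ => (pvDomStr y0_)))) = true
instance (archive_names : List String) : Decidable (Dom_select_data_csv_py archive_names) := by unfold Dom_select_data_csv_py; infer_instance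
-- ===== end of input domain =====

-- ===== PORT A =====
-- B changes: one min with a priority key replaces A's three filtered passes with sort/head fallbacks (objective: simpler).
-- On empty input / no csv file the Python raises ValueError; those inputs are excluded by Pre_ and the ports return "".
def select_data_csv_py (archive_names : List String) : String :=
  let csv_files := archive_names.filter
    (fun x => PySem.Str.endswith (PySem.Str.lower x) ".csv")
  if csv_files = [] then ""  -- Python: raise ValueError (excluded by Pre_)
  else
    let conjunto_candidates := csv_files.filter
      (fun x => PySem.Str.isIn "conjunto" (PySem.Str.lower x) && PySem.Str.isIn "datos" (PySem.Str.lower x))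
    if conjunto_candidates ≠ [] then
      (PySem.List.sorted conjunto_candidates (fun x => x)).headD ""
    else
      let non_dictionary_candidates := csv_files.filter
        (fun x => !(PySem.Str.isIn "diccionario" (PySem.Str.lower x)))
      if non_dictionary_candidates ≠ [] then
        (PySem.List.sorted non_dictionary_candidates (fun x => x)).headD ""
      else
        (PySem.List.sorted csv_files (fun x => x)).headD ""

-- ===== PORT B =====
-- rank(x): 0 for conjunto+datos files, 1 for non-diccionario files, 2 otherwise
def pvRank (x : String) : Nat :=
  let l := PySem.Str.lower x
  if PySem.Str.isIn "conjunto" l && PySem.Str.isIn "datos" l then 0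
  else if !(PySem.Str.isIn "diccionario" l) then 1
  else 2

def select_data_csv_py_alt (archive_names : List String) : String :=
  let csv_files := archive_names.filter
    (fun x => PySem.Str.endswith (PySem.Str.lower x) ".csv")
  match PySem.List.min2? csv_files pvRank (fun x => x) with
  | some m => m
  | none => ""  -- Python: raise ValueError (excluded by Pre_)

-- ===== PRECONDITION & SPEC =====
-- Pre_ excludes exactly the inputs with no '.csv' entry, where Python A (and B) raise ValueError.
def Pre_select_data_csv_py (archive_names : List String) : Prop :=
  ∃ x ∈ archive_names, PySem.Str.endswith (PySem.Str.lower x) ".csv" = true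
instance (archive_names : List String) : Decidable (Pre_select_data_csv_py archive_names) := by
  unfold Pre_select_data_csv_py; infer_instance
def pvWitness_select_data_csv_py : List String := ["conjunto_de_datos.csv", "diccionario.csv"]

def Spec_select_data_csv_py (archive_names : List String) (out : String) : Prop := out = select_data_csv_py_alt archive_names
instance (archive_names : List String) (out : String) : Decidable (Spec_select_data_csv_py archive_names out) := by unfold Spec_select_data_csv_py; infer_instance

-- ===== CLAIM (what is proved, stated in full; the proofs are below) =====
def Claim_equal_select_data_csv_py : Prop := ∀ (archive_names : List String), Dom_select_data_csv_py archive_names → Pre_select_data_csv_py archive_names → Spec_select_data_csv_py archive_names (select_data_csv_py archive_names)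

-- ===== LEMMAS AND PROOFS =====

-- strict lexicographic order on the priority key (pvRank x, x)
def pvSL (m y : String) : Prop := pvRank m < pvRank y ∨ (pvRank m = pvRank y ∧ m < y)

-- the unique strict minimum under (pvRank ·, ·) is what min2? returns
theorem pv_min2_unique (xs : List String) : ∀ (a m : String),
    (m = a ∨ m ∈ xs) → (∀ y, (y = a ∨ y ∈ xs) → pvSL m y ∨ y = m) →
    PySem.List.min2? (a :: xs) pvRank (fun x => x) = some m := by
  induction xs with
  | nil =>
    intro a m hm _
    simp only [List.mem_nil_iff, or_false] at hm
    subst hm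
    rfl
  | cons x t ih =>
    intro a m hm hmin
    have hstep : ∀ b : String, PySem.List.min2? (b :: x :: t) pvRank (fun x => x)
        = PySem.List.min2? ((if (decide (pvRank x < pvRank b) || (!decide (pvRank b < pvRank x) && decide (x < b))) = true then x else b) :: t) pvRank (fun x => x) := by
      intro b
      by_cases hc : (decide (pvRank x < pvRank b) || (!decide (pvRank b < pvRank x) && decide (x < b))) = true
      · unfold PySem.List.min2?
        simp only [List.foldl]
        rw [if_pos hc, if_pos hc]
      · unfold PySem.List.min2?
        simp only [List.foldl]
        rw [if_neg hc, if_neg hc]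
    rw [hstep a]
    by_cases hc : (decide (pvRank x < pvRank a) || (!decide (pvRank a < pvRank x) && decide (x < a))) = true
    · rw [if_pos hc]
      simp only [Bool.or_eq_true, Bool.and_eq_true, Bool.not_eq_eq_eq_not, Bool.not_true,
        decide_eq_true_eq, decide_eq_false_iff_not] at hc
      refine ih x m ?_ ?_
      · -- membership for the new accumulator x
        rcases hm with hma | hmx
        · -- m = a : impossible when the condition fired
          subst hma
          rcases hmin x (Or.inr (List.mem_cons_self)) with hsl | hxm
          · rcases hsl with hr | ⟨hre, hlt⟩
            · rcases hc with h1 | ⟨h2, h3⟩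
              · exact absurd h1 (Nat.lt_asymm hr)
              · exact absurd hr (by simpa using h2)
            · rcases hc with h1 | ⟨h2, h3⟩
              · omega
              · exact absurd h3 (lt_asymm hlt)
          · subst hxm
            rcases hc with h1 | ⟨h2, h3⟩
            · exact absurd h1 (lt_irrefl _)
            · exact absurd h3 (lt_irrefl _)
        · rcases List.mem_cons.mp hmx with h | h
          · exact Or.inl h
          · exact Or.inr h
      · intro y hy
        rcases hy with hyx | hyt
        · exact hmin y (Or.inr (hyx ▸ List.mem_cons_self))
        · exact hmin y (Or.inr (List.mem_cons_of_mem _ hyt))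
    · rw [if_neg hc]
      simp only [Bool.or_eq_true, Bool.and_eq_true, Bool.not_eq_eq_eq_not, Bool.not_true,
        decide_eq_true_eq, decide_eq_false_iff_not, not_or, not_and] at hc
      refine ih a m ?_ ?_
      · rcases hm with hma | hmx
        · exact Or.inl hma
        · rcases List.mem_cons.mp hmx with h | h
          · -- m = x : impossible when the condition did not fire, unless m = a
            subst h
            rcases hmin a (Or.inl rfl) with hsl | ham
            · exfalso
              rcases hsl with hr | ⟨hre, hlt⟩
              · exact hc.1 hr
              · exact hc.2 (by omega) hlt
            · exact Or.inl ham.symm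
          · exact Or.inr h
      · intro y hy
        rcases hy with hya | hyt
        · exact hmin y (Or.inl hya)
        · exact hmin y (Or.inr (List.mem_cons_of_mem _ hyt))

-- head of sorted(l) is a member and a lower bound
theorem pv_sorted_headD_min (l : List String) (hl : l ≠ []) :
    (PySem.List.sorted l (fun x => x)).headD "" ∈ l ∧
      ∀ y ∈ l, (PySem.List.sorted l (fun x => x)).headD "" ≤ y := by
  cases h : PySem.List.sorted l (fun x => x) with
  | nil => exact absurd ((PySem.List.sorted_eq_nil_iff l (fun x => x) false).mp h) hl
  | cons m t =>
    simp only [List.headD_cons]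
    refine ⟨?_, ?_⟩
    · exact (PySem.List.mem_sorted l (fun x => x) false m).mp (h ▸ List.mem_cons_self)
    · exact PySem.List.key_head_sorted_le l (fun x => x) h

theorem pvRank_eq_zero {x : String}
    (h : (PySem.Str.isIn "conjunto" (PySem.Str.lower x) && PySem.Str.isIn "datos" (PySem.Str.lower x)) = true) :
    pvRank x = 0 := by simp only [pvRank]; rw [h]; rfl

theorem pvRank_eq_one {x : String}
    (h0 : (PySem.Str.isIn "conjunto" (PySem.Str.lower x) && PySem.Str.isIn "datos" (PySem.Str.lower x)) = false)
    (h1 : (!(PySem.Str.isIn "diccionario" (PySem.Str.lower x))) = true) :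
    pvRank x = 1 := by simp only [pvRank]; rw [h0, h1]; rfl

theorem pvRank_eq_two {x : String}
    (h0 : (PySem.Str.isIn "conjunto" (PySem.Str.lower x) && PySem.Str.isIn "datos" (PySem.Str.lower x)) = false)
    (h1 : (!(PySem.Str.isIn "diccionario" (PySem.Str.lower x))) = false) :
    pvRank x = 2 := by simp only [pvRank]; rw [h0, h1]; rfl

theorem pvRank_pos {x : String}
    (h : (PySem.Str.isIn "conjunto" (PySem.Str.lower x) && PySem.Str.isIn "datos" (PySem.Str.lower x)) = false) :
    0 < pvRank x := by
  simp only [pvRank]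
  rw [h]
  simp only [Bool.false_eq_true, if_false]
  split <;> omega

-- ===== VERDICT (by name: the statement is the Claim_ definition above) =====
theorem select_data_csv_py_spec : Claim_equal_select_data_csv_py := by
  unfold Claim_equal_select_data_csv_py
  intro an _hdom hpre
  unfold Spec_select_data_csv_py
  simp only [select_data_csv_py, select_data_csv_py_alt]
  have hcs : an.filter (fun x => PySem.Str.endswith (PySem.Str.lower x) ".csv") ≠ [] := by
    obtain ⟨x, hx, hp⟩ := hpre
    intro h
    have := List.filter_eq_nil_iff.mp h x hx
    simp at hp
    simp [hp] at this
  obtain ⟨c, t, hct⟩ := List.exists_cons_of_ne_nil hcs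
  rw [hct]
  rw [if_neg (by simp : ¬ ((c :: t : List String) = []))]
  by_cases h0 : ((c :: t).filter (fun x => PySem.Str.isIn "conjunto" (PySem.Str.lower x) && PySem.Str.isIn "datos" (PySem.Str.lower x))) = []
  · rw [if_neg (not_not_intro h0)]
    have hall0 : ∀ y ∈ (c :: t : List String),
        (PySem.Str.isIn "conjunto" (PySem.Str.lower y) && PySem.Str.isIn "datos" (PySem.Str.lower y)) = false := by
      intro y hy
      simpa using List.filter_eq_nil_iff.mp h0 y hy
    by_cases h1 : ((c :: t).filter (fun x => !(PySem.Str.isIn "diccionario" (PySem.Str.lower x)))) = []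
    · rw [if_neg (not_not_intro h1)]
      have hall1 : ∀ y ∈ (c :: t : List String),
          (!(PySem.Str.isIn "diccionario" (PySem.Str.lower y))) = false := by
        intro y hy
        simpa using List.filter_eq_nil_iff.mp h1 y hy
      obtain ⟨hmem, hlb⟩ := pv_sorted_headD_min (c :: t) (by simp)
      have hkey := pv_min2_unique t c ((PySem.List.sorted (c :: t) (fun x => x)).headD "")
        (List.mem_cons.mp hmem)
        (by
          intro y hy
          have hycs : y ∈ (c :: t : List String) := List.mem_cons.mpr hy
          rcases lt_or_eq_of_le (hlb y hycs) with hlt | heq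
          · exact Or.inl (Or.inr ⟨by
              rw [pvRank_eq_two (hall0 _ hmem) (hall1 _ hmem), pvRank_eq_two (hall0 _ hycs) (hall1 _ hycs)], hlt⟩)
          · exact Or.inr heq.symm)
      rw [hkey]
    · rw [if_pos h1]
      obtain ⟨hmem, hlb⟩ := pv_sorted_headD_min _ h1
      have hm1 : (!(PySem.Str.isIn "diccionario" (PySem.Str.lower ((PySem.List.sorted ((c :: t).filter (fun x => !(PySem.Str.isIn "diccionario" (PySem.Str.lower x)))) (fun x => x)).headD "")))) = true :=
        (List.mem_filter.mp hmem).2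
      have hmcs := (List.mem_filter.mp hmem).1
      have hrm := pvRank_eq_one (hall0 _ hmcs) hm1
      have hkey := pv_min2_unique t c _ (List.mem_cons.mp hmcs)
        (by
          intro y hy
          have hycs : y ∈ (c :: t : List String) := List.mem_cons.mpr hy
          by_cases hy1 : (!(PySem.Str.isIn "diccionario" (PySem.Str.lower y))) = true
          · have hyin : y ∈ (c :: t).filter (fun x => !(PySem.Str.isIn "diccionario" (PySem.Str.lower x))) := List.mem_filter.mpr ⟨hycs, hy1⟩
            rcases lt_or_eq_of_le (hlb y hyin) with hlt | heq
            · exact Or.inl (Or.inr ⟨by rw [hrm, pvRank_eq_one (hall0 _ hycs) hy1], hlt⟩)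
            · exact Or.inr heq.symm
          · refine Or.inl (Or.inl ?_)
            rw [hrm, pvRank_eq_two (hall0 _ hycs) (by simpa using hy1)]
            omega)
      rw [hkey]
  · rw [if_pos h0]
    obtain ⟨hmem, hlb⟩ := pv_sorted_headD_min _ h0
    have hm0 := (List.mem_filter.mp hmem).2
    have hmcs := (List.mem_filter.mp hmem).1
    have hrm := pvRank_eq_zero hm0
    have hkey := pv_min2_unique t c _ (List.mem_cons.mp hmcs)
      (by
        intro y hy
        have hycs : y ∈ (c :: t : List String) := List.mem_cons.mpr hy
        by_cases hy0 : (PySem.Str.isIn "conjunto" (PySem.Str.lower y) && PySem.Str.isIn "datos" (PySem.Str.lower y)) = true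
        · have hyin : y ∈ (c :: t).filter (fun x => PySem.Str.isIn "conjunto" (PySem.Str.lower x) && PySem.Str.isIn "datos" (PySem.Str.lower x)) := List.mem_filter.mpr ⟨hycs, hy0⟩
          rcases lt_or_eq_of_le (hlb y hyin) with hlt | heq
          · exact Or.inl (Or.inr ⟨by rw [hrm, pvRank_eq_zero hy0], hlt⟩)
          · exact Or.inr heq.symm
        · refine Or.inl (Or.inl ?_)
          rw [hrm]
          exact pvRank_pos (by simpa using hy0))
    rw [hkey]
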